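-- pv_equiv track=rewrite | github.com/sueszli/vector-database-benchmark | dataset/python-mutated/attrs.py | ordered_intersection
-- ===== SOURCE A (Python) =====
-- from functools import reduce
-- from itertools import chain
--
-- def ordered_intersection(in_):
--     if False:
--         return 10
--     'Set union of n sequences, ordered for reproducibility across runs.'
--     intersection = reduce(set.intersection, in_, set(in_[0]))
--     for x in chain.from_iterable(in_):
--         if x in intersection:
--             yield x
--             intersection.remove(x)
-- ===== SOURCE B (Python) =====
-- def ordered_intersection(in_):
--     'Set union of n sequences, ordered for reproducibility across runs.'
--     # Staged: one combined intersection set, then dict.fromkeys to dedup in_[0]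
--     # in order (intersection elements all first appear in in_[0], so chain
--     # order equals in_[0] order). No per-element bookkeeping loop at all.
--     common = set(in_[0]).intersection(*in_[1:])
--     yield from (x for x in dict.fromkeys(in_[0]) if x in common)
-- ===== Notes on version B (the rewrite author's own statement) =====
-- stated objective: simpler
-- what changed: Drops the reduce fold and the remove-on-yield scan of the full chain: B computes one combined intersection set of all sequences and yields the ordered dedup (dict.fromkeys) of in_[0] filtered by that set, with no per-element mutation loop (intersection elements first appear in in_[0]).
import Mathlib
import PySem

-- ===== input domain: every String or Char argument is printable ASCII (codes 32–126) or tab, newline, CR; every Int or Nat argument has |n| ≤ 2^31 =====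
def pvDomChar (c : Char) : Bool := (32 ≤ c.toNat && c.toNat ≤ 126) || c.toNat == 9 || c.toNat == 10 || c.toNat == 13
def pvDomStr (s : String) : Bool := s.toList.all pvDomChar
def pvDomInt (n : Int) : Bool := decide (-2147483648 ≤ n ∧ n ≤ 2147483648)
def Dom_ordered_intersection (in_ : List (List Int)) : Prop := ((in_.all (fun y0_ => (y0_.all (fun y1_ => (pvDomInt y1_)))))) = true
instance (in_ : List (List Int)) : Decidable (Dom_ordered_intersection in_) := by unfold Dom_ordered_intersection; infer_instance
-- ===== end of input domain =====

-- B drops the reduce fold and the remove-on-yield scan of the full chain, replacing them with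
-- one combined intersection set and a filter of the ordered dedup of in_[0] (simpler; same cost).

-- ===== PORT A =====
-- 'for x in chain.from_iterable(in_): if x in intersection: yield x; intersection.remove(x)'
-- (inside the branch x ∈ s holds, so Python's set.remove equals Set.discard)
def pvLoopA (s : PySem.Set Int) : List Int → List Int
  | [] => []
  | x :: xs => if x ∈ s then x :: pvLoopA (PySem.Set.discard s x) xs else pvLoopA s xs

def ordered_intersection (in_ : List (List Int)) : List Int :=
  -- in_[0] raises IndexError on in_ = [] (excluded by Pre_); headD [] totalises it
  let intersection : PySem.Set Int :=
    in_.foldl (fun acc seq => PySem.Set.inter acc seq) (PySem.Set.ofList (in_.headD []))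
  pvLoopA intersection in_.flatten

-- ===== PORT B =====
-- 'common = set(in_[0]).intersection(*in_[1:]); yield from (x for x in dict.fromkeys(in_[0]) if x in common)'
def ordered_intersection_alt (in_ : List (List Int)) : List Int :=
  let common : PySem.Set Int :=
    in_.tail.foldl (fun acc seq => PySem.Set.inter acc seq) (PySem.Set.ofList (in_.headD []))
  (PySem.List.dedup (in_.headD [])).filter (fun x => decide (x ∈ common))

-- ===== PRECONDITION & SPEC =====
-- Pre_ excludes only in_ = [], on which both A and B raise IndexError at in_[0].
def Pre_ordered_intersection (in_ : List (List Int)) : Prop := in_ ≠ []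
instance (in_ : List (List Int)) : Decidable (Pre_ordered_intersection in_) := by unfold Pre_ordered_intersection; infer_instance
def pvWitness_ordered_intersection : List (List Int) := [[1, 2, 3, 2], [3, 1, 5], [1, 3]]

def Spec_ordered_intersection (in_ : List (List Int)) (out : List Int) : Prop := out = ordered_intersection_alt in_
instance (in_ : List (List Int)) (out : List Int) : Decidable (Spec_ordered_intersection in_ out) := by unfold Spec_ordered_intersection; infer_instance

-- ===== CLAIM (what is proved, stated in full; the proofs are below) =====
def Claim_equal_ordered_intersection : Prop := ∀ (in_ : List (List Int)), Dom_ordered_intersection in_ → Pre_ordered_intersection in_ → Spec_ordered_intersection in_ (ordered_intersection in_)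

-- ===== LEMMAS AND PROOFS =====

-- membership in a left fold of set intersections
lemma pv_mem_foldl_inter (l : List (List Int)) (s : PySem.Set Int) (y : Int) :
    y ∈ l.foldl (fun acc seq => PySem.Set.inter acc seq) s ↔ y ∈ s ∧ ∀ t ∈ l, y ∈ t := by
  induction l generalizing s with
  | nil => simp
  | cons t l ih =>
    simp only [List.foldl_cons, ih, PySem.Set.mem_inter, List.mem_cons]
    constructor
    · rintro ⟨⟨h1, h2⟩, h3⟩
      exact ⟨h1, fun u hu => hu.elim (fun e => e ▸ h2) (h3 u)⟩
    · rintro ⟨h1, h3⟩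
      exact ⟨⟨h1, h3 t (Or.inl rfl)⟩, fun u hu => h3 u (Or.inr hu)⟩

-- A's loop yields exactly the first occurrences (dedup) of the chain that lie in s
lemma pvLoopA_eq (ys : List Int) : ∀ s : PySem.Set Int,
    pvLoopA s ys = (PySem.List.dedup ys).filter (fun y => decide (y ∈ s)) := by
  induction ys with
  | nil => intro s; simp [pvLoopA, PySem.List.dedup_eq_ofList, PySem.Set.ofList_nil]
  | cons x xs ih =>
    intro s
    have hded : PySem.List.dedup (x :: xs) = x :: PySem.Set.discard (PySem.List.dedup xs) x := by
      simp [PySem.List.dedup_eq_ofList, PySem.Set.ofList_cons]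
    have hdis : PySem.Set.discard (PySem.List.dedup xs) x
        = (PySem.List.dedup xs).filter (fun y => !(y == x)) := rfl
    rw [hded, hdis]
    by_cases hx : x ∈ s
    · have e1 : pvLoopA s (x :: xs) = x :: pvLoopA (PySem.Set.discard s x) xs := by
        simp [pvLoopA, hx]
      rw [e1, ih]
      simp only [List.filter_cons, List.filter_filter, decide_eq_true hx]
      congr 1
      apply List.filter_congr
      intro y _
      by_cases hy : y = x
      · simp [hy, PySem.Set.mem_discard]
      · by_cases hs : y ∈ s <;> simp [hy, hs, PySem.Set.mem_discard]
    · have e1 : pvLoopA s (x :: xs) = pvLoopA s xs := by simp [pvLoopA, hx]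
      rw [e1, ih]
      simp only [List.filter_cons, List.filter_filter, decide_eq_false hx]
      rw [if_neg (by simp)]
      apply List.filter_congr
      intro y _
      by_cases hy : y = x
      · simp [hy, hx]
      · simp [hy]

-- ===== VERDICT (by name: the statement is the Claim_ definition above) =====
theorem ordered_intersection_spec : Claim_equal_ordered_intersection := by
  intro in_ _ hpre
  unfold Spec_ordered_intersection
  obtain ⟨hd, tl, rfl⟩ : ∃ hd tl, in_ = hd :: tl := by
    cases in_ with
    | nil => exact absurd rfl hpre
    | cons a b => exact ⟨a, b, rfl⟩
  unfold ordered_intersection ordered_intersection_alt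
  simp only [List.headD_cons, List.tail_cons, List.flatten_cons]
  rw [pvLoopA_eq]
  rw [PySem.List.dedup_eq_ofList, PySem.List.dedup_eq_ofList, PySem.Set.ofList_append,
    PySem.Set.update_eq_append_filter, List.filter_append, List.filter_filter]
  -- the tail part of the deduplicated chain contributes nothing: A's intersection ⊆ set(in_[0])
  have htail : (PySem.Set.ofList tl.flatten).filter
      (fun a => decide (a ∈ (hd :: tl).foldl (fun acc seq => PySem.Set.inter acc seq) (PySem.Set.ofList hd)) &&
        !PySem.Set.contains (PySem.Set.ofList hd) a) = [] := by
    apply List.filter_eq_nil_iff.mpr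
    intro y _
    simp only [List.foldl_cons]
    simp only [Bool.and_eq_true, Bool.not_eq_eq_eq_not, Bool.not_true, decide_eq_true_eq,
      PySem.Set.contains_eq_listContains, not_and, Bool.not_eq_false, List.contains_iff_mem]
    intro hI
    have h2 := (pv_mem_foldl_inter tl ((PySem.Set.ofList hd).inter hd) y).mp hI
    have h3 : y ∈ (PySem.Set.ofList hd).inter hd := h2.1
    rw [PySem.Set.mem_inter] at h3
    exact (PySem.Set.mem_ofList _ _).mpr h3.2
  rw [htail, List.append_nil]
  apply List.filter_congr
  intro y hy
  have hyh : y ∈ hd := (PySem.Set.mem_ofList _ _).mp hy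
  apply decide_eq_decide.mpr
  rw [pv_mem_foldl_inter, pv_mem_foldl_inter]
  constructor
  · rintro ⟨-, h⟩
    exact ⟨hy, fun t ht => h t (List.mem_cons_of_mem _ ht)⟩
  · rintro ⟨-, h⟩
    exact ⟨hy, fun t ht => (List.mem_cons.mp ht).elim (fun e => e ▸ hyh) (h t)⟩
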